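-- pv_equiv track=rewrite | github.com/FenouilletLucas/DAGaml | test/genCPX.py | check
-- ===== SOURCE A (Python) =====
-- def check(m):
-- 	n = len(m)
-- 	T = [0] * n
-- 	for x in m : T[x]+=1
-- 	for i in range(n):
-- 		if T[i] == 0:
-- 			for j in range(i+1, n):
-- 				if T[j] != 0 :
-- 					return False
-- 			return True
-- 	return True
-- ===== SOURCE B (Python) =====
-- def check(m):
--     n = len(m)
--     T = [0] * n
--     for x in m:
--         T[x] += 1
--     k = sum(1 for t in T if t != 0)
--     return all(T[i] != 0 for i in range(k))
-- ===== Notes on version B (the rewrite author's own statement) =====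
-- stated objective: simpler
-- what changed: Replaces A's early-return first-gap search with nested scans by counting the distinct present slots (k = number of nonzero counts) and checking that the first k count slots are all nonzero; the count-table loop is kept so indexing behaviour is identical.
import Mathlib
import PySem

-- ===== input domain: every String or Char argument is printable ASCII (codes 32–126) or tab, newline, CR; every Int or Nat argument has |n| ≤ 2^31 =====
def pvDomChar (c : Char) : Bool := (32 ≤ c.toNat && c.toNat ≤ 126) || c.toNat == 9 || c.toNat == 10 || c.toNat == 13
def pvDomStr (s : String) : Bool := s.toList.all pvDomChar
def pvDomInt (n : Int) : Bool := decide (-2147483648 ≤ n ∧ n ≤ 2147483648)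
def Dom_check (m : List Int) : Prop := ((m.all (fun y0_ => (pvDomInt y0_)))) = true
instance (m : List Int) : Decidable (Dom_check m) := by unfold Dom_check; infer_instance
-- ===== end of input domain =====

-- B changes the second phase only: instead of A's early-return first-gap search with a
-- nested confirmation scan, it counts the nonzero slots and checks that they form a prefix.

-- shared helper: 'T = [0]*n; for x in m: T[x] += 1' — this loop is textually identical in A and B
def pvBuildT (m : List Int) : List Int :=
  m.foldl (fun T x => PySem.List.pySetD T x (PySem.List.pyGetD T x 0 + 1)) (List.replicate m.length 0)

-- ===== PORT A =====
-- 'for j in range(i+1, n): if T[j] != 0: return False / return True'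
def pvInnerA (T : List Int) : List Int → Bool
  | [] => true
  | j :: js => if PySem.List.pyGetD T j 0 ≠ 0 then false else pvInnerA T js

-- 'for i in range(n): if T[i] == 0: <inner scan> / return True'
def pvOuterA (T : List Int) (n : Int) : List Int → Bool
  | [] => true
  | i :: is =>
      if PySem.List.pyGetD T i 0 = 0 then pvInnerA T (PySem.List.pyRange (i + 1) n 1)
      else pvOuterA T n is

def check (m : List Int) : Bool :=
  let n : Int := m.length
  let T := pvBuildT m
  pvOuterA T n (PySem.List.pyRange 0 n 1)

-- ===== PORT B =====
def check_alt (m : List Int) : Bool :=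
  let T := pvBuildT m
  let k : Int := T.foldl (fun acc t => if t ≠ 0 then acc + 1 else acc) 0
  (PySem.List.pyRange 0 k 1).all (fun i => PySem.List.pyGetD T i 0 != 0)

-- ===== PRECONDITION & SPEC =====
-- Pre_ excludes exactly the inputs on which Python's 'T[x] += 1' raises IndexError
def Pre_check (m : List Int) : Prop := ∀ x ∈ m, PySem.Raise.InRange m.length x
instance (m : List Int) : Decidable (Pre_check m) := by unfold Pre_check; infer_instance
def pvWitness_check : List Int := [1, 0, 2]
def Spec_check (m : List Int) (out : Bool) : Prop := out = check_alt m
instance (m : List Int) (out : Bool) : Decidable (Spec_check m out) := by unfold Spec_check; infer_instance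

-- ===== CLAIM (what is proved, stated in full; the proofs are below) =====
def Claim_equal_check : Prop := ∀ (m : List Int), Dom_check m → Pre_check m → Spec_check m (check m)

-- ===== LEMMAS AND PROOFS =====

lemma inner_iff (T : List Int) (js : List Int) :
    pvInnerA T js = true ↔ ∀ j ∈ js, PySem.List.pyGetD T j 0 = 0 := by
  induction js with
  | nil => simp [pvInnerA]
  | cons j js ih =>
      simp only [pvInnerA]
      by_cases h : PySem.List.pyGetD T j 0 = 0 <;> simp [h, ih]

lemma outer_iff (T : List Int) (n : Int) : ∀ (d : Nat) (a : Int), 0 ≤ a → d = (n - a).toNat →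
    (pvOuterA T n (PySem.List.pyRange a n 1) = true ↔
      ∀ i j : Int, a ≤ i → i < j → j < n → PySem.List.pyGetD T i 0 = 0 →
        PySem.List.pyGetD T j 0 = 0) := by
  intro d
  induction d with
  | zero =>
      intro a ha hd
      have hna : n ≤ a := by omega
      rw [PySem.List.pyRange_one_eq_nil hna]
      constructor
      · intro _ i j hai hij hjn; omega
      · intro _; rfl
  | succ d ih =>
      intro a ha hd
      have han : a < n := by omega
      rw [PySem.List.pyRange_one_cons han]
      simp only [pvOuterA]
      by_cases hz : PySem.List.pyGetD T a 0 = 0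
      · simp only [if_pos hz, inner_iff]
        constructor
        · intro h i j hai hij hjn _
          exact h j (by rw [PySem.List.mem_pyRange_one]; omega)
        · intro h j hj
          rw [PySem.List.mem_pyRange_one] at hj
          exact h a j le_rfl hj.1 hj.2 hz
      · rw [if_neg hz, ih (a + 1) (by omega) (by omega)]
        constructor
        · intro h i j hai hij hjn hiz
          rcases eq_or_lt_of_le hai with rfl | hlt
          · exact absurd hiz hz
          · exact h i j (by omega) hij hjn hiz
        · intro h i j hai hij hjn hiz
          exact h i j (by omega) hij hjn hiz

-- Nat-level core: zeros form a suffix iff the first (countP nonzero) entries are all nonzero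
lemma crux (T : List Int) :
    (∀ i j : Nat, i < j → j < T.length → T.getD i 0 = 0 → T.getD j 0 = 0) ↔
      (∀ i : Nat, i < T.countP (fun t => t ≠ 0) → T.getD i 0 ≠ 0) := by
  set k := T.countP (fun t => t ≠ 0) with hk
  have hkn : k ≤ T.length := List.countP_le_length
  constructor
  · intro L i hik hz
    have hin : i < T.length := lt_of_lt_of_le hik hkn
    -- every index ≥ i is zero
    have hall : ∀ r : Nat, i ≤ r → r < T.length → T.getD r 0 = 0 := by
      intro r hir hrn
      rcases eq_or_lt_of_le hir with rfl | h
      · exact hz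
      · exact L i r h hrn hz
    -- so the nonzeros all sit among the first i entries
    have hdrop : (T.drop i).countP (fun t => t ≠ 0) = 0 := by
      rw [List.countP_eq_zero]
      intro a ha
      rcases List.mem_iff_getElem.mp ha with ⟨r, hr, rfl⟩
      have hlen : i + r < T.length := by
        have := List.length_drop (l := T) (i := i) ▸ hr; omega
      have : (T.drop i)[r] = T[i + r] := List.getElem_drop ..
      rw [this]
      have := hall (i + r) (by omega) hlen
      rw [List.getD_eq_getElem T 0 hlen] at this
      simpa using this
    have hsplit : k = (T.take i).countP (fun t => t ≠ 0) + (T.drop i).countP (fun t => t ≠ 0) := by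
      rw [hk]; conv_lhs => rw [← List.take_append_drop i T]
      rw [List.countP_append]
    have h1 : (T.take i).countP (fun t => t ≠ 0) ≤ (T.take i).length := List.countP_le_length
    have h2 : (T.take i).length ≤ i := by simp
    omega
  · intro R i j hij hjn hiz
    have hki : k ≤ i := by
      by_contra h
      exact R i (by omega) hiz
    -- the first k entries are all nonzero, hence countP (take k) = k and countP (drop k) = 0
    have htake : (T.take k).countP (fun t => t ≠ 0) = k := by
      have hlen : (T.take k).length = k := by simp [Nat.min_eq_left hkn]
      conv_rhs => rw [← hlen]
      rw [List.countP_eq_length]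
      intro a ha
      rcases List.mem_iff_getElem.mp ha with ⟨r, hr, rfl⟩
      have hrk : r < k := by rw [hlen] at hr; exact hr
      have hrn : r < T.length := lt_of_lt_of_le hrk hkn
      have : (T.take k)[r] = T[r] := List.getElem_take ..
      rw [this]
      have := R r hrk
      rw [List.getD_eq_getElem T 0 hrn] at this
      simpa using this
    have hsplit : k = (T.take k).countP (fun t => t ≠ 0) + (T.drop k).countP (fun t => t ≠ 0) := by
      rw [hk]; conv_lhs => rw [← List.take_append_drop k T]
      rw [List.countP_append]
    have hdrop : (T.drop k).countP (fun t => t ≠ 0) = 0 := by omega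
    rw [List.countP_eq_zero] at hdrop
    have hjk : k ≤ j := by omega
    have hjk' : j - k < (T.drop k).length := by simp; omega
    have hmem : (T.drop k)[j - k] ∈ T.drop k := List.getElem_mem _
    have heq : (T.drop k)[j - k] = T[j] := by
      rw [List.getElem_drop]; congr 1; omega
    have := hdrop _ hmem
    rw [heq] at this
    rw [List.getD_eq_getElem T 0 hjn]
    simpa using this

-- the whole comparison depends only on the shared count table T
lemma main_eq (T : List Int) :
    pvOuterA T (T.length : Int) (PySem.List.pyRange 0 (T.length : Int) 1) =
      (PySem.List.pyRange 0 (T.foldl (fun acc t => if t ≠ 0 then acc + 1 else acc) 0) 1).all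
        (fun i => PySem.List.pyGetD T i 0 != 0) := by
  have hk : T.foldl (fun acc t => if t ≠ 0 then acc + 1 else acc) 0
      = (T.countP (fun t => t ≠ 0) : Int) := by
    rw [PySem.List.foldl_ite_add_one]; simp
  rw [hk]
  have hA := outer_iff T (T.length : Int) ((T.length : Int) - 0).toNat 0 le_rfl rfl
  have hB : ((PySem.List.pyRange 0 (T.countP (fun t => t ≠ 0) : Int) 1).all
        (fun i => PySem.List.pyGetD T i 0 != 0) = true) ↔
      ∀ i : Int, 0 ≤ i → i < (T.countP (fun t => t ≠ 0) : Int) → PySem.List.pyGetD T i 0 ≠ 0 := by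
    rw [List.all_eq_true]
    constructor
    · intro h i h0 hik
      have := h i (by rw [PySem.List.mem_pyRange_one]; exact ⟨h0, hik⟩)
      simpa using this
    · intro h i hi
      rw [PySem.List.mem_pyRange_one] at hi
      simpa using h i hi.1 hi.2
  -- transfer the Int-quantified statements to the Nat-level crux
  have hAiff : (∀ i j : Int, 0 ≤ i → i < j → j < (T.length : Int) →
        PySem.List.pyGetD T i 0 = 0 → PySem.List.pyGetD T j 0 = 0) ↔
      (∀ i j : Nat, i < j → j < T.length → T.getD i 0 = 0 → T.getD j 0 = 0) := by
    constructor
    · intro h i j hij hjn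
      have := h (i : Int) (j : Int) (by omega) (by exact_mod_cast hij) (by exact_mod_cast hjn)
      simpa [PySem.List.pyGetD_natCast] using this
    · intro h i j h0 hij hjn hiz
      have h0j : 0 ≤ j := by omega
      have hi' : i = (i.toNat : Int) := by omega
      have hj' : j = (j.toNat : Int) := by omega
      rw [hi', PySem.List.pyGetD_natCast] at hiz
      rw [hj', PySem.List.pyGetD_natCast]
      exact h i.toNat j.toNat (by omega) (by omega) hiz
  have hBiff : (∀ i : Int, 0 ≤ i → i < (T.countP (fun t => t ≠ 0) : Int) →
        PySem.List.pyGetD T i 0 ≠ 0) ↔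
      (∀ i : Nat, i < T.countP (fun t => t ≠ 0) → T.getD i 0 ≠ 0) := by
    constructor
    · intro h i hik
      have := h (i : Int) (by omega) (by exact_mod_cast hik)
      simpa [PySem.List.pyGetD_natCast] using this
    · intro h i h0 hik
      have hi' : i = (i.toNat : Int) := by omega
      rw [hi', PySem.List.pyGetD_natCast]
      exact h i.toNat (by omega)
  rw [Bool.eq_iff_iff, hA, hB, hAiff, hBiff]
  exact crux T

lemma length_pvBuildT (m : List Int) : (pvBuildT m).length = m.length := by
  unfold pvBuildT
  have : ∀ (xs : List Int) (T : List Int),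
      (xs.foldl (fun T x => PySem.List.pySetD T x (PySem.List.pyGetD T x 0 + 1)) T).length
        = T.length := by
    intro xs
    induction xs with
    | nil => intro T; rfl
    | cons x xs ih => intro T; rw [List.foldl_cons, ih, PySem.List.length_pySetD]
  rw [this]; simp

-- ===== VERDICT (by name: the statement is the Claim_ definition above) =====
theorem check_spec : Claim_equal_check := by
  intro m _ _
  unfold Spec_check check check_alt
  have h := main_eq (pvBuildT m)
  rw [length_pvBuildT] at h
  exact h
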